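-- pv_equiv track=rewrite | github.com/zlatoivan/FormalLanguageTheory | lab 2. LLepsilon/LLepsilon.py | sep_lls
-- ===== SOURCE A (Python) =====
-- def sep_lls(lls):
--     out = []
--     o = ""
--     for c in lls:
--         if c == "\n":
--             out.append(o)
--             o = ""
--             continue
--         if c != " ":
--             o += c
--     return out
-- ===== SOURCE B (Python) =====
-- def sep_lls(lls):
--     return lls.replace(" ", "").split("\n")[:-1]
-- ===== Notes on version B (the rewrite author's own statement) =====
-- stated objective: simpler
-- what changed: Replaces the char-by-char accumulator loop with one line of standard-library calls: strip spaces with str.replace, split on newlines, and drop the segment after the last newline with [:-1].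
import Mathlib
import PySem

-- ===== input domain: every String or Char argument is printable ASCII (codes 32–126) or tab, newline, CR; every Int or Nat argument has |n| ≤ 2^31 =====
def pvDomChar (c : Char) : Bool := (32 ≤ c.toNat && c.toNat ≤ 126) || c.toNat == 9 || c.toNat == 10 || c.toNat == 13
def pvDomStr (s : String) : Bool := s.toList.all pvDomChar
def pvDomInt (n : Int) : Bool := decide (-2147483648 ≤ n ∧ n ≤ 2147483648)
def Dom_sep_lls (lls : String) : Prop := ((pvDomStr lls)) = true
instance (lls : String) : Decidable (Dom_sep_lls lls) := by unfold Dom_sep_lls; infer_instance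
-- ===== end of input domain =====

-- B replaces A's char-by-char accumulator loop with stdlib calls (replace + split + [:-1]); objective: simpler.

-- ===== PORT A =====
-- A's loop: 'for c in lls', appending segments on '\n', skipping ' '.
def sepA : List Char → String → List String → List String
  | [], _o, out => out
  | c :: t, o, out =>
    if c = '\n' then sepA t "" (out ++ [o])
    else if c ≠ ' ' then sepA t (o.push c) out
    else sepA t o out

def sep_lls (lls : String) : List String := sepA lls.toList "" []

-- ===== PORT B =====
-- B: lls.replace(" ", "").split("\n")[:-1]
def sep_lls_alt (lls : String) : List String :=
  PySem.List.slice ((PySem.Str.split? (PySem.Str.replace lls " " "") "\n").getD []) none (some (-1))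

-- ===== PRECONDITION & SPEC =====
def Spec_sep_lls (lls : String) (out : List String) : Prop := out = sep_lls_alt lls
instance (lls : String) (out : List String) : Decidable (Spec_sep_lls lls out) := by unfold Spec_sep_lls; infer_instance

-- ===== CLAIM (what is proved, stated in full; the proofs are below) =====
def Claim_equal_sep_lls : Prop := ∀ (lls : String), Dom_sep_lls lls → Spec_sep_lls lls (sep_lls lls)

-- ===== LEMMAS AND PROOFS =====

-- proof-side model of splitting on '\n' with an accumulated (reversed) current segment
def pvParts : List Char → List Char → List (List Char)
  | cur, [] => [cur.reverse]
  | cur, c :: t => if c = '\n' then cur.reverse :: pvParts [] t else pvParts (c :: cur) t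

theorem pvParts_ne_nil (cur l : List Char) : pvParts cur l ≠ [] := by
  induction l generalizing cur with
  | nil => simp [pvParts]
  | cons c t ih => by_cases h : c = '\n' <;> simp [pvParts, h, ih]

theorem singleton_isPrefixOf (a c : Char) (t : List Char) :
    ([a].isPrefixOf (c :: t)) = (a == c) := by
  simp [List.isPrefixOf]

theorem replace_go_space (fuel : Nat) : ∀ (l acc : List Char), l.length ≤ fuel →
    PySem.Chars.replace.go [' '] [] fuel l acc = acc.reverse ++ l.filter (· ≠ ' ') := by
  induction fuel with
  | zero =>
    intro l acc h
    have : l = [] := by cases l <;> simp_all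
    subst this; simp [PySem.Chars.replace.go]
  | succ n ih =>
    intro l acc h
    cases l with
    | nil => simp [PySem.Chars.replace.go]
    | cons c t =>
      by_cases hc : c = ' '
      · subst hc
        rw [PySem.Chars.replace.go]
        rw [if_pos (by rw [singleton_isPrefixOf]; simp)]
        simpa using ih t acc (by simpa using h)
      · rw [PySem.Chars.replace.go]
        rw [if_neg (by rw [singleton_isPrefixOf]; simp; exact fun h' => hc h'.symm)]
        rw [ih t (c :: acc) (by simpa using h)]
        simp [hc]

theorem replace_space (cs : List Char) :
    PySem.Chars.replace cs [' '] [] = cs.filter (· ≠ ' ') := by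
  rw [PySem.Chars.replace]
  rw [if_neg (by decide)]
  simpa using replace_go_space cs.length cs []

theorem splitOn_go_nl (fuel : Nat) : ∀ (l cur : List Char) (accs : List (List Char)),
    l.length ≤ fuel →
    PySem.Chars.splitOn.go ['\n'] fuel l cur accs = accs.reverse ++ pvParts cur l := by
  induction fuel with
  | zero =>
    intro l cur accs h
    have : l = [] := by cases l <;> simp_all
    subst this; simp [PySem.Chars.splitOn.go, pvParts]
  | succ n ih =>
    intro l cur accs h
    cases l with
    | nil => simp [PySem.Chars.splitOn.go, pvParts]
    | cons c t =>
      by_cases hc : c = '\n'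
      · subst hc
        rw [PySem.Chars.splitOn.go]
        rw [if_pos (by rw [singleton_isPrefixOf]; simp)]
        have := ih t [] (cur.reverse :: accs) (by simpa using h)
        simpa [pvParts] using this
      · rw [PySem.Chars.splitOn.go]
        rw [if_neg (by rw [singleton_isPrefixOf]; simp; exact fun h' => hc h'.symm)]
        rw [ih t (c :: cur) accs (by simpa using h)]
        simp [pvParts, hc]

theorem splitOn_nl (cs : List Char) :
    PySem.Chars.splitOn cs ['\n'] = pvParts [] cs := by
  rw [PySem.Chars.splitOn]
  simpa using splitOn_go_nl (cs.length + 1) cs [] [] (by omega)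

theorem sepA_eq (l : List Char) : ∀ (o : String) (out : List String),
    sepA l o out = out ++ ((pvParts o.toList.reverse (l.filter (· ≠ ' '))).dropLast).map String.ofList := by
  induction l with
  | nil => intro o out; simp [sepA, pvParts]
  | cons c t ih =>
    intro o out
    by_cases hn : c = '\n'
    · subst hn
      rw [sepA, if_pos rfl, ih]
      have hne := pvParts_ne_nil ([] : List Char) (t.filter (· ≠ ' '))
      simp [pvParts, List.dropLast_cons_of_ne_nil (by simpa [List.map_eq_nil_iff] using hne),
        String.ofList_toList]
    · by_cases hs : c = ' '
      · subst hs
        rw [sepA, if_neg (by decide), if_neg (by simp), ih]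
        simp
      · rw [sepA, if_neg hn, if_pos (by simpa using hs), ih]
        simp [pvParts, hn, hs]

theorem map_dropLast {α β : Type} (f : α → β) (l : List α) :
    (l.map f).dropLast = l.dropLast.map f := by
  induction l with
  | nil => rfl
  | cons a t ih => cases t <;> simp_all

-- ===== VERDICT (by name: the statement is the Claim_ definition above) =====
theorem sep_lls_spec : Claim_equal_sep_lls := by
  intro lls _
  unfold Spec_sep_lls sep_lls sep_lls_alt
  rw [sepA_eq]
  rw [PySem.Str.replace, PySem.Str.split?]
  have h1 : (String.ofList (PySem.Chars.replace lls.toList " ".toList "".toList)).toList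
      = lls.toList.filter (· ≠ ' ') := by
    rw [String.toList_ofList]
    have : " ".toList = [' '] := rfl
    have h0 : "".toList = ([] : List Char) := rfl
    rw [this, h0, replace_space]
  rw [PySem.Chars.split?]
  rw [if_neg (by decide)]
  simp only [Option.map_some, Option.getD_some]
  rw [h1]
  have h2 : "\n".toList = ['\n'] := rfl
  rw [h2, splitOn_nl]
  rw [PySem.List.slice_to_neg_one]
  rw [map_dropLast]
  simp
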